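-- pv_equiv track=rewrite | github.com/MichaelHorak/MyFirstProjects | project_refactor.py | has_unwanted_pattern
-- ===== SOURCE A (Python) =====
-- def has_unwanted_pattern(album):
--     unwanted_patterns = [
--         'special edition',
--         'deluxe edition',
--         'single',
--         'soundtrack',
--         'motion picture',
--         'collection',
--         'remastered',
--         'remaster',
--         'mix',
--         'expanded edition',
--         'deluxe version',
--         'deluxe video edition',
--         'version',
--         'deluxe'
--     ]
--     return any(pattern in album.lower() for pattern in unwanted_patterns)
-- ===== SOURCE B (Python) =====
-- # Position-major single scan with a minimal pattern set: the 4 redundant patterns of A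
-- # ('deluxe edition', 'remastered', 'deluxe version', 'deluxe video edition') each contain
-- # one of the kept patterns, so they can never change the answer.
-- UNWANTED_CORE = (
--     'single',
--     'soundtrack',
--     'motion picture',
--     'collection',
--     'remaster',
--     'mix',
--     'version',
--     'deluxe',
--     'special edition',
--     'expanded edition',
-- )
--
-- def has_unwanted_pattern(album):
--     s = album.lower()
--     return any(s.startswith(UNWANTED_CORE, i) for i in range(len(s)))
-- ===== Notes on version B (the rewrite author's own statement) =====
-- stated objective: alternative
-- what changed: Replaces 14 independent whole-string substring scans with one position-major left-to-right scan of the lowered string that tests a minimal set of 10 patterns (the 4 patterns of A that contain another pattern are dropped as redundant) via startswith at each index.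
import Mathlib
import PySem

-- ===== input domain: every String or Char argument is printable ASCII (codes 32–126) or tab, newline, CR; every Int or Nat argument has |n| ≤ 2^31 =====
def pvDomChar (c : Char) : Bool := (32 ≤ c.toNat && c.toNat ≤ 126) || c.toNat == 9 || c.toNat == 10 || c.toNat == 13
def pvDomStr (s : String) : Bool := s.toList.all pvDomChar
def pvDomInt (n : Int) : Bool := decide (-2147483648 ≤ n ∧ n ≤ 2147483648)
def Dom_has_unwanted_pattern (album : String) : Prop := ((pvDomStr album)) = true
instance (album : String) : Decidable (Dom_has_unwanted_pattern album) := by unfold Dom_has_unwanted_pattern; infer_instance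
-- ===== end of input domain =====

-- B replaces A's 14 independent substring scans by one position-major scan of the
-- lowered string over a minimal set of 10 patterns (objective: alternative algorithm).

-- ===== PORT A =====
def unwantedPatterns : List String :=
  ["special edition", "deluxe edition", "single", "soundtrack", "motion picture",
   "collection", "remastered", "remaster", "mix", "expanded edition",
   "deluxe version", "deluxe video edition", "version", "deluxe"]

def has_unwanted_pattern (album : String) : Bool :=
  unwantedPatterns.any (fun pattern => PySem.Str.isIn pattern (PySem.Str.lower album))

-- ===== PORT B =====
def unwantedCore : List String :=
  ["single", "soundtrack", "motion picture", "collection", "remaster",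
   "mix", "version", "deluxe", "special edition", "expanded edition"]

-- s.startswith(UNWANTED_CORE, i) tested at each position i of the lowered string,
-- as a structural scan over its suffixes
def scanCore : List Char → Bool
  | [] => false
  | c :: rest =>
    unwantedCore.any (fun p => p.toList.isPrefixOf (c :: rest)) || scanCore rest

def has_unwanted_pattern_alt (album : String) : Bool :=
  scanCore (PySem.Str.lower album).toList

-- ===== PRECONDITION & SPEC =====
def Spec_has_unwanted_pattern (album : String) (out : Bool) : Prop := out = has_unwanted_pattern_alt album
instance (album : String) (out : Bool) : Decidable (Spec_has_unwanted_pattern album out) := by unfold Spec_has_unwanted_pattern; infer_instance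

-- ===== CLAIM (what is proved, stated in full; the proofs are below) =====
def Claim_equal_has_unwanted_pattern : Prop := ∀ (album : String), Dom_has_unwanted_pattern album → Spec_has_unwanted_pattern album (has_unwanted_pattern album)

-- ===== LEMMAS AND PROOFS =====

-- B's scan finds exactly the core patterns occurring as infixes
theorem scanCore_iff (cs : List Char) :
    scanCore cs = true ↔ ∃ p ∈ unwantedCore, p.toList <:+: cs := by
  induction cs with
  | nil =>
      constructor
      · intro h; simp [scanCore] at h
      · rintro ⟨p, hp, hinf⟩
        have hpe : p.toList = [] := List.eq_nil_of_infix_nil hinf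
        simp only [unwantedCore, List.mem_cons, List.not_mem_nil, or_false] at hp
        rcases hp with rfl | rfl | rfl | rfl | rfl | rfl | rfl | rfl | rfl | rfl <;>
          exact absurd hpe (by decide)
  | cons c rest ih =>
      simp only [scanCore, Bool.or_eq_true, List.any_eq_true, ih,
        List.isPrefixOf_iff_prefix]
      constructor
      · rintro (⟨p, hp, hpre⟩ | ⟨p, hp, hinf⟩)
        · exact ⟨p, hp, hpre.isInfix⟩
        · exact ⟨p, hp, List.infix_cons hinf⟩
      · rintro ⟨p, hp, hinf⟩
        rcases List.infix_cons_iff.mp hinf with hpre | hinf'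
        · exact Or.inl ⟨p, hp, hpre⟩
        · exact Or.inr ⟨p, hp, hinf'⟩

-- the 4 redundant patterns of A each contain a core pattern, so the two pattern
-- sets detect the same strings
theorem core_covers (cs : List Char) :
    (∃ p ∈ unwantedCore, p.toList <:+: cs) ↔ ∃ p ∈ unwantedPatterns, p.toList <:+: cs := by
  constructor
  · rintro ⟨p, hp, hinf⟩
    simp only [unwantedCore, List.mem_cons, List.not_mem_nil, or_false] at hp
    rcases hp with rfl | rfl | rfl | rfl | rfl | rfl | rfl | rfl | rfl | rfl <;>
      refine ⟨_, ?_, hinf⟩ <;> decide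
  · rintro ⟨p, hp, hinf⟩
    simp only [unwantedPatterns, List.mem_cons, List.not_mem_nil, or_false] at hp
    rcases hp with rfl | rfl | rfl | rfl | rfl | rfl | rfl | rfl | rfl | rfl | rfl | rfl | rfl | rfl
    · exact ⟨"special edition", by decide, hinf⟩
    · exact ⟨"deluxe", by decide, List.IsInfix.trans (by decide) hinf⟩
    · exact ⟨"single", by decide, hinf⟩
    · exact ⟨"soundtrack", by decide, hinf⟩
    · exact ⟨"motion picture", by decide, hinf⟩
    · exact ⟨"collection", by decide, hinf⟩
    · exact ⟨"remaster", by decide, List.IsInfix.trans (by decide) hinf⟩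
    · exact ⟨"remaster", by decide, hinf⟩
    · exact ⟨"mix", by decide, hinf⟩
    · exact ⟨"expanded edition", by decide, hinf⟩
    · exact ⟨"version", by decide, List.IsInfix.trans (by decide) hinf⟩
    · exact ⟨"deluxe", by decide, List.IsInfix.trans (by decide) hinf⟩
    · exact ⟨"version", by decide, hinf⟩
    · exact ⟨"deluxe", by decide, hinf⟩

-- ===== VERDICT (by name: the statement is the Claim_ definition above) =====
theorem has_unwanted_pattern_spec : Claim_equal_has_unwanted_pattern := by
  intro album _
  unfold Spec_has_unwanted_pattern has_unwanted_pattern has_unwanted_pattern_alt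
  rw [Bool.eq_iff_iff, scanCore_iff, core_covers]
  simp only [List.any_eq_true, PySem.Str.isIn_iff_infix]
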